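-- pv_equiv track=rewrite | github.com/Patrik1352/Yandex_algo | 1/F.py | transform_array_with_odd
-- ===== SOURCE A (Python) =====
-- def transform_array_with_odd(arr):
--     result = []  # Результирующий массив
--     combination = []
--     even_product = 1  # Для накопления произведения четных чисел
--     odd_product = 1  # Для накопления произведения нечетных чисел
--     for num in arr:
--         if num % 2 == 0:  # Четное число
--             if odd_product != 1:  # Если есть накопленное произведение нечетных чисел
--                 combination.append('+')
--                 result.append(odd_product)  # Добавляем его в результат
--                 odd_product = 1  # Сбрасываем произведение
--             else:
--                 combination.append('x')
--             even_product = 2  # Накапливаем произведение четных чисел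
--         else:  # Нечетное число
--             if even_product != 1:  # Если есть накопленное произведение четных чисел
--                 combination.append('x')
--                 result.append(even_product)  # Добавляем его в результат
--                 even_product = 1  # Сбрасываем произведение
--             else:
--                 combination.append('x')
--             odd_product = 2  # Накапливаем произведение нечетных чисел
--     # После окончания цикла проверяем, осталось ли ненулевое произведение
--     if even_product != 1:  # Для четных чисел
--         result.append(even_product)
--     if odd_product != 1:  # Для нечетных чисел
--         result.append(odd_product)
--
--
--     f = (len(result) + arr[0]%2) % 4
--     if f in [0, 1]:
--         index_plas = combination.index('+')
--         combination[index_plas] = 'x'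
--
--
--     return ''.join(combination[1:])
-- ===== SOURCE B (Python) =====
-- def transform_array_with_odd(arr):
--     # Simpler: run count + adjacent-parity marks instead of product accumulators.
--     runs = 1 + sum(1 for a, b in zip(arr, arr[1:]) if a % 2 != b % 2)
--     combination = ['x'] + ['+' if a % 2 == 1 and b % 2 == 0 else 'x'
--                            for a, b in zip(arr, arr[1:])]
--     if (runs + arr[0] % 2) % 4 in (0, 1):
--         combination[combination.index('+')] = 'x'
--     return ''.join(combination[1:])
-- ===== Notes on version B (the rewrite author's own statement) =====
-- stated objective: simpler
-- what changed: B drops A's even/odd product accumulators and side-effect result list, computing the run count directly by counting adjacent parity changes and building the mark list by an adjacent-pair parity comparison.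
import Mathlib
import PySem

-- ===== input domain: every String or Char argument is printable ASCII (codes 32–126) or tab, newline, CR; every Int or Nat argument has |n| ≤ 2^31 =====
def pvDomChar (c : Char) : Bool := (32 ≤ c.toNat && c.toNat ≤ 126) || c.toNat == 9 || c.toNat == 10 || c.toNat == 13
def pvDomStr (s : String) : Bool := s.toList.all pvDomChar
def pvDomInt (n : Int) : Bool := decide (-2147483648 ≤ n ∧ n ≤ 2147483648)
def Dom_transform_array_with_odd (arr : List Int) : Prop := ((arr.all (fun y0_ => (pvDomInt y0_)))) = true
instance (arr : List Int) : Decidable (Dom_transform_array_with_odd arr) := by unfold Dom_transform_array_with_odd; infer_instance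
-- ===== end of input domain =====

-- B replaces A's even/odd product accumulators and side-effect result list by a direct
-- run count and an adjacent-parity mark list (objective: simpler).


-- ===== PORT A =====
-- loop body of A: state = (result, combination, even_product, odd_product)
def pvStepA (s : List Int × List Char × Int × Int) (num : Int) : List Int × List Char × Int × Int :=
  let (result, combination, even_product, odd_product) := s
  if PySem.Int.mod num 2 = 0 then
    if odd_product ≠ 1 then
      (result ++ [odd_product], combination ++ ['+'], 2, 1)
    else
      (result, combination ++ ['x'], 2, odd_product)
  else
    if even_product ≠ 1 then
      (result ++ [even_product], combination ++ ['x'], 1, 2)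
    else
      (result, combination ++ ['x'], even_product, 2)

def transform_array_with_odd (arr : List Int) : String :=
  let s := arr.foldl pvStepA ([], [], 1, 1)
  let (result, combination, even_product, odd_product) := s
  let result := if even_product ≠ 1 then result ++ [even_product] else result
  let result := if odd_product ≠ 1 then result ++ [odd_product] else result
  -- arr[0] raises IndexError on empty arr: excluded by Pre_; headD used under that guard
  let f := PySem.Int.mod ((result.length : Int) + PySem.Int.mod (arr.headD 0) 2) 4
  let combination :=
    if f = 0 ∨ f = 1 then
      -- combination.index('+') raises ValueError when absent: excluded by Pre_
      match PySem.List.index? combination '+' with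
      | some i => combination.set i 'x'
      | none => combination
    else combination
  String.ofList (combination.drop 1)

-- ===== PORT B =====
def transform_array_with_odd_alt (arr : List Int) : String :=
  let pairs := arr.zip arr.tail
  let runs : Int := 1 + ((pairs.filter (fun p => PySem.Int.mod p.1 2 != PySem.Int.mod p.2 2)).length : Int)
  let combination :=
    'x' :: pairs.map (fun p => if PySem.Int.mod p.1 2 = 1 ∧ PySem.Int.mod p.2 2 = 0 then '+' else 'x')
  let f := PySem.Int.mod (runs + PySem.Int.mod (arr.headD 0) 2) 4
  let combination :=
    if f = 0 ∨ f = 1 then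
      match PySem.List.index? combination '+' with
      | some i => combination.set i 'x'
      | none => combination
    else combination
  String.ofList (combination.drop 1)

-- ===== PRECONDITION & SPEC =====
-- Pre_ excludes exactly where A raises: the empty list (IndexError on arr[0]) and inputs where
-- f ∈ {0,1} but no odd→even adjacent pair exists (ValueError from combination.index('+')).
def Pre_transform_array_with_odd (arr : List Int) : Prop :=
  arr ≠ [] ∧
  (let f := PySem.Int.mod
      ((1 + ((arr.zip arr.tail).filter (fun p => PySem.Int.mod p.1 2 != PySem.Int.mod p.2 2)).length : Int)
        + PySem.Int.mod (arr.headD 0) 2) 4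
   (f = 0 ∨ f = 1) →
     ∃ p ∈ arr.zip arr.tail, PySem.Int.mod p.1 2 = 1 ∧ PySem.Int.mod p.2 2 = 0)
instance (arr : List Int) : Decidable (Pre_transform_array_with_odd arr) := by
  unfold Pre_transform_array_with_odd; infer_instance

def pvWitness_transform_array_with_odd : List Int := [1, 2, 3]

def Spec_transform_array_with_odd (arr : List Int) (out : String) : Prop := out = transform_array_with_odd_alt arr
instance (arr : List Int) (out : String) : Decidable (Spec_transform_array_with_odd arr out) := by unfold Spec_transform_array_with_odd; infer_instance

-- ===== CLAIM (what is proved, stated in full; the proofs are below) =====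
def Claim_equal_transform_array_with_odd : Prop := ∀ (arr : List Int), Dom_transform_array_with_odd arr → Pre_transform_array_with_odd arr → Spec_transform_array_with_odd arr (transform_array_with_odd arr)


-- ===== LEMMAS AND PROOFS =====

-- the state after processing an element x (the products only depend on x's parity)
def pvPState (x : Int) : Int × Int := if PySem.Int.mod x 2 = 0 then (2, 1) else (1, 2)

lemma pvFoldA (l : List Int) : ∀ (x : Int) (res : List Int) (comb : List Char),
    l.foldl pvStepA (res, comb, pvPState x) =
      (res ++ (((x :: l).zip l).filter
          (fun p => PySem.Int.mod p.1 2 != PySem.Int.mod p.2 2)).map (fun _ => (2 : Int)),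
       comb ++ ((x :: l).zip l).map
          (fun p => if PySem.Int.mod p.1 2 = 1 ∧ PySem.Int.mod p.2 2 = 0 then '+' else 'x'),
       pvPState (l.getLastD x)) := by
  induction l with
  | nil => intro x res comb; simp [pvPState]
  | cons y t ih =>
    intro x res comb
    have hm : ∀ a : Int, PySem.Int.mod a 2 = a % 2 :=
      fun a => PySem.Int.mod_eq_emod_of_pos (by norm_num)
    rcases PySem.Int.mod_two_eq x with hx | hx <;> rcases PySem.Int.mod_two_eq y with hy | hy <;>
      rw [hm] at hx hy
    · -- x even, y even
      have hdx : 2 ∣ x := by omega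
      have hdy : 2 ∣ y := by omega
      have hst : pvStepA (res, comb, pvPState x) y = (res, comb ++ ['x'], pvPState y) := by
        simp [pvStepA, pvPState, hm, hx, hy, hdx, hdy]
      simp only [List.foldl_cons, hst, ih y]
      simp [List.zip, hm, hx, hy, hdx, hdy]
      cases t <;> simp [List.getLast?_cons]
    · -- x even, y odd
      have hdx : 2 ∣ x := by omega
      have hdy : ¬ 2 ∣ y := by omega
      have hst : pvStepA (res, comb, pvPState x) y = (res ++ [2], comb ++ ['x'], pvPState y) := by
        simp [pvStepA, pvPState, hm, hx, hy, hdx, hdy]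
      simp only [List.foldl_cons, hst, ih y]
      simp [List.zip, hm, hx, hy, hdx, hdy]
      cases t <;> simp [List.getLast?_cons]
    · -- x odd, y even
      have hdx : ¬ 2 ∣ x := by omega
      have hdy : 2 ∣ y := by omega
      have hst : pvStepA (res, comb, pvPState x) y = (res ++ [2], comb ++ ['+'], pvPState y) := by
        simp [pvStepA, pvPState, hm, hx, hy, hdx, hdy]
      simp only [List.foldl_cons, hst, ih y]
      simp [List.zip, hm, hx, hy, hdx, hdy]
      cases t <;> simp [List.getLast?_cons]
    · -- x odd, y odd
      have hdx : ¬ 2 ∣ x := by omega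
      have hdy : ¬ 2 ∣ y := by omega
      have hst : pvStepA (res, comb, pvPState x) y = (res, comb ++ ['x'], pvPState y) := by
        simp [pvStepA, pvPState, hm, hx, hy, hdx, hdy]
      simp only [List.foldl_cons, hst, ih y]
      simp [List.zip, hm, hx, hy, hdx, hdy]
      cases t <;> simp [List.getLast?_cons]

theorem transform_array_with_odd_spec_aux (arr : List Int)
    (hpre : Pre_transform_array_with_odd arr) :
    transform_array_with_odd arr = transform_array_with_odd_alt arr := by
  obtain ⟨hne, -⟩ := hpre
  obtain ⟨x, t, rfl⟩ := List.exists_cons_of_ne_nil hne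
  have hm : ∀ a : Int, PySem.Int.mod a 2 = a % 2 :=
    fun a => PySem.Int.mod_eq_emod_of_pos (by norm_num)
  have hfirst : (x :: t).foldl pvStepA ([], [], 1, 1) = t.foldl pvStepA ([], ['x'], pvPState x) := by
    by_cases hdx : 2 ∣ x
    · have hx : x % 2 = 0 := by omega
      simp [pvStepA, pvPState, hm, hx, hdx]
    · have hx : x % 2 = 1 := by omega
      simp [pvStepA, pvPState, hm, hx, hdx]
  unfold transform_array_with_odd transform_array_with_odd_alt
  rw [hfirst, pvFoldA t x [] ['x']]
  by_cases hdl : 2 ∣ (t.getLastD x)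
  · simp only [pvPState, List.getLastD_eq_getLast?] at hdl ⊢
    simp [hdl, List.zip]
    congr 1
    split_ifs with h1 h2 <;> first | rfl | (exfalso; omega)
  · simp only [pvPState, List.getLastD_eq_getLast?] at hdl ⊢
    simp [hdl, List.zip]
    congr 1
    split_ifs with h1 h2 <;> first | rfl | (exfalso; omega)

-- ===== VERDICT (by name: the statement is the Claim_ definition above) =====
theorem transform_array_with_odd_spec : Claim_equal_transform_array_with_odd := by
  intro arr _ hpre
  unfold Spec_transform_array_with_odd
  exact transform_array_with_odd_spec_aux arr hpre
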